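-- pv_equiv track=rewrite | github.com/barneygale/pybind | engines/xlib/xkey.py | mask_permutations
-- ===== SOURCE A (Python) =====
-- def mask_permutations(mask, ignore_mask):
-- 	#PERM & (~IGNO | modm)
-- 	#Get all permutations of replacing some "0"s with "1"s in ignore_mask
-- 	i = ignore_mask
-- 	out = []
-- 	while i < 256:
-- 		i |= ignore_mask
-- 		out.append(i & (~ignore_mask | mask))
-- 		i+=1
-- 	return out
-- ===== SOURCE B (Python) =====
-- def mask_permutations(mask, ignore_mask):
--     # Filter-and-mask over the full byte range instead of incrementally
--     # stepping through supersets of ignore_mask with |= / += 1.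
--     keep = ~ignore_mask | mask
--     return [v & keep for v in range(256) if v & ignore_mask == ignore_mask]
-- ===== Notes on version B (the rewrite author's own statement) =====
-- stated objective: simpler
-- what changed: Replaces the incremental while-loop that steps through supersets of ignore_mask via 'i |= ignore_mask; i += 1' with a single filtered comprehension over range(256), keeping only bytes that are supersets of ignore_mask and masking each with a precomputed keep value.
import Mathlib
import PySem

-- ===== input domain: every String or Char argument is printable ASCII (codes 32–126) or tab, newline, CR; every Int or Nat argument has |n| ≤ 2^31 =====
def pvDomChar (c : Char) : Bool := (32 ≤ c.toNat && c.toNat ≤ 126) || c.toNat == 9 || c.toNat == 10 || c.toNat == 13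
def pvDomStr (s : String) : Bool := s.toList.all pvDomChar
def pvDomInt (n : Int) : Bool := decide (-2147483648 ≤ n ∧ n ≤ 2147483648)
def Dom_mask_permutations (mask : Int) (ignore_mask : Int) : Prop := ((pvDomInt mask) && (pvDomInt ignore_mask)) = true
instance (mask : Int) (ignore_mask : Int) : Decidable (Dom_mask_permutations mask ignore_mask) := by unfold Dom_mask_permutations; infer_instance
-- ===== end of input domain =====

-- B replaces the incremental superset-stepping while-loop with one filtered
-- scan over range(256) (objective: simpler). Equal on 0 ≤ ignore_mask.

-- ===== PORT A =====
-- the while-loop; fuel only makes it total (≤ 256 iterations when 0 ≤ ignore_mask)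
def mpLoop (mask : Int) (ignore_mask : Int) : Nat → Int → List Int → List Int
  | 0, _, out => out
  | fuel+1, i, out =>
    if i < 256 then
      let i2 := PySem.Int.bor i ignore_mask                   -- i |= ignore_mask
      mpLoop mask ignore_mask fuel (i2 + 1)                   -- i += 1
        (out ++ [PySem.Int.band i2 (PySem.Int.bor (Int.not ignore_mask) mask)])  -- out.append(i & (~ignore_mask | mask))
    else out

def mask_permutations (mask : Int) (ignore_mask : Int) : List Int :=
  mpLoop mask ignore_mask 257 ignore_mask []

-- ===== PORT B =====
def mask_permutations_alt (mask : Int) (ignore_mask : Int) : List Int :=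
  let keep := PySem.Int.bor (Int.not ignore_mask) mask
  ((PySem.List.pyRange 0 256 1).filter
      (fun v => PySem.Int.band v ignore_mask == ignore_mask)).map
    (fun v => PySem.Int.band v keep)

-- ===== PRECONDITION & SPEC =====
-- Pre_ excludes negative ignore_mask: there A's while-loop never terminates
-- (i | ignore_mask stays negative), so A returns on exactly 0 ≤ ignore_mask.
def Pre_mask_permutations (mask : Int) (ignore_mask : Int) : Prop := 0 ≤ ignore_mask
instance (mask : Int) (ignore_mask : Int) : Decidable (Pre_mask_permutations mask ignore_mask) := by unfold Pre_mask_permutations; infer_instance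
def pvWitness_mask_permutations : Int × Int := (5, 3)

def Spec_mask_permutations (mask : Int) (ignore_mask : Int) (out : List Int) : Prop := out = mask_permutations_alt mask ignore_mask
instance (mask : Int) (ignore_mask : Int) (out : List Int) : Decidable (Spec_mask_permutations mask ignore_mask out) := by unfold Spec_mask_permutations; infer_instance

-- ===== CLAIM (what is proved, stated in full; the proofs are below) =====
def Claim_equal_mask_permutations : Prop := ∀ (mask : Int) (ignore_mask : Int), Dom_mask_permutations mask ignore_mask → Pre_mask_permutations mask ignore_mask → Spec_mask_permutations mask ignore_mask (mask_permutations mask ignore_mask)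

-- ===== LEMMAS AND PROOFS =====

-- the loop's sequence of `i` values after `|=`, independent of `mask`
def supLoop (m : Int) : Nat → Int → List Int
  | 0, _ => []
  | fuel+1, i => if i < 256 then
      let i' := PySem.Int.bor i m
      i' :: supLoop m fuel (i' + 1)
    else []

theorem mpLoop_eq_map_supLoop (mask m : Int) (fuel : Nat) :
    ∀ (i : Int) (out : List Int),
      mpLoop mask m fuel i out
        = out ++ (supLoop m fuel i).map
            (fun v => PySem.Int.band v (PySem.Int.bor (Int.not m) mask)) := by
  induction fuel with
  | zero => intro i out; simp [mpLoop, supLoop]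
  | succ n ih =>
    intro i out
    by_cases h : i < 256
    · simp [mpLoop, supLoop, h, ih]
    · simp [mpLoop, supLoop, h]

set_option maxHeartbeats 4000000 in
set_option maxRecDepth 10000 in
theorem supLoop_eq_filter_small :
    ∀ m : Fin 256, supLoop (m : Int) 257 (m : Int)
      = (PySem.List.pyRange 0 256 1).filter
          (fun v => PySem.Int.band v (m : Int) == (m : Int)) := by decide

theorem supLoop_eq_filter (m : Int) (hm : 0 ≤ m) :
    supLoop m 257 m
      = (PySem.List.pyRange 0 256 1).filter
          (fun v => PySem.Int.band v m == m) := by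
  by_cases h : m < 256
  · have hk : ((⟨m.toNat, by omega⟩ : Fin 256) : Int) = m := by
      simp [Int.toNat_of_nonneg hm]
    have := supLoop_eq_filter_small ⟨m.toNat, by omega⟩
    rwa [hk] at this
  · -- 256 ≤ m: the loop exits at once, and no byte is a superset of m
    have h256 : ¬ m < 256 := h
    have hl : supLoop m 257 m = [] := by
      show supLoop m (256 + 1) m = []
      simp [supLoop, h256]
    rw [hl]
    symm
    rw [List.filter_eq_nil_iff]
    intro v hv
    have hv' := PySem.List.mem_pyRange_one.mp hv
    have hv0 : 0 ≤ v := by omega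
    rw [PySem.Int.band_of_nonneg hv0 hm]
    have hle : v.toNat &&& m.toNat ≤ v.toNat := Nat.and_le_left
    simp only [beq_iff_eq]
    omega

-- ===== VERDICT (by name: the statement is the Claim_ definition above) =====
theorem mask_permutations_spec : Claim_equal_mask_permutations := by
  intro mask m _ hpre
  unfold Spec_mask_permutations mask_permutations mask_permutations_alt
  rw [mpLoop_eq_map_supLoop, supLoop_eq_filter m hpre]
  simp
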